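-- pv_equiv track=rewrite | github.com/anhwrkspx/gcpftracker | utils.py | get_badge_statistics
-- ===== SOURCE A (Python) =====
-- def get_badge_statistics(badge_info):
--     badge_skills = 0
--     badge_base = 0
--     for badge in badge_info:
--         if badge["type"] == "skill":
--             badge_skills += 1
--         if badge["type"] == "bases":
--             badge_base += 1
--     badgeCount = badge_base + badge_skills
--     return [badgeCount, badge_skills,badge_base]
-- ===== SOURCE B (Python) =====
-- def get_badge_statistics(badge_info):
--     types = [badge["type"] for badge in badge_info]
--     badge_skills = types.count("skill")
--     badge_base = types.count("bases")
--     return [badge_skills + badge_base, badge_skills, badge_base]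
-- ===== Notes on version B (the rewrite author's own statement) =====
-- stated objective: simpler
-- what changed: Replaces the single branching loop over two scalar accumulators by staged passes: project the 'type' fields into a list once, then obtain each count with list.count, with no explicit loop state at all.
import Mathlib
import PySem

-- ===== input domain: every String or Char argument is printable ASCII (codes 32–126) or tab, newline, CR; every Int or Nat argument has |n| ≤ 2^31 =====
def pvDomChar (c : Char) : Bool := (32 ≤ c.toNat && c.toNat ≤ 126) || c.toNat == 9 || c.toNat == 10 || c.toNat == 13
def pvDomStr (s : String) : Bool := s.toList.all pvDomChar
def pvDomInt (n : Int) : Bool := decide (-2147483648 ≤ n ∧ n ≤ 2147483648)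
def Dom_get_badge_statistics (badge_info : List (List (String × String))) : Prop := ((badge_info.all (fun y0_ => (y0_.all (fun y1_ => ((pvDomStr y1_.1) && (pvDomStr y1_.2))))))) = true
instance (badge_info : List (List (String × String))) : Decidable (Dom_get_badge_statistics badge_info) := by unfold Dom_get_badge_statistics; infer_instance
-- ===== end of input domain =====

-- B replaces the branching single-pass loop with two scalar accumulators by staged passes:
-- project the 'type' fields once, then take each count with list.count (same O(n) cost).

-- ===== PORT A =====
def get_badge_statistics (badge_info : List (List (String × String))) : List Int :=
  let acc := badge_info.foldl (fun (acc : Int × Int) badge =>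
    let acc := if (PySem.Dict.mk badge).getD "type" "" = "skill" then (acc.1 + 1, acc.2) else acc
    if (PySem.Dict.mk badge).getD "type" "" = "bases" then (acc.1, acc.2 + 1) else acc) (0, 0)
  let badgeCount := acc.2 + acc.1
  [badgeCount, acc.1, acc.2]

-- ===== PORT B =====
def get_badge_statistics_alt (badge_info : List (List (String × String))) : List Int :=
  let types := badge_info.map (fun badge => (PySem.Dict.mk badge).getD "type" "")
  let badge_skills : Int := PySem.List.count types "skill"
  let badge_base : Int := PySem.List.count types "bases"
  [badge_skills + badge_base, badge_skills, badge_base]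

-- ===== PRECONDITION & SPEC =====
-- Pre_ excludes badges without a "type" key, on which Python A raises KeyError.
def Pre_get_badge_statistics (badge_info : List (List (String × String))) : Prop :=
  ∀ badge ∈ badge_info, (PySem.Dict.mk badge).contains "type" = true
instance (badge_info : List (List (String × String))) : Decidable (Pre_get_badge_statistics badge_info) := by unfold Pre_get_badge_statistics; infer_instance
def pvWitness_get_badge_statistics : (List (List (String × String))) :=
  [[("type", "skill")], [("type", "bases")], [("type", "other")]]
def Spec_get_badge_statistics (badge_info : List (List (String × String))) (out : List Int) : Prop := out = get_badge_statistics_alt badge_info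
instance (badge_info : List (List (String × String))) (out : List Int) : Decidable (Spec_get_badge_statistics badge_info out) := by unfold Spec_get_badge_statistics; infer_instance

-- ===== CLAIM (what is proved, stated in full; the proofs are below) =====
def Claim_equal_get_badge_statistics : Prop := ∀ (badge_info : List (List (String × String))), Dom_get_badge_statistics badge_info → Pre_get_badge_statistics badge_info → Spec_get_badge_statistics badge_info (get_badge_statistics badge_info)

-- ===== LEMMAS AND PROOFS =====

-- A's loop keeps exactly the two counts of "skill" and "bases" among the type fields seen so far.
theorem pv_foldA (l : List (List (String × String))) (s b : Int) :
    l.foldl (fun (acc : Int × Int) badge =>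
      let acc := if (PySem.Dict.mk badge).getD "type" "" = "skill" then (acc.1 + 1, acc.2) else acc
      if (PySem.Dict.mk badge).getD "type" "" = "bases" then (acc.1, acc.2 + 1) else acc) (s, b)
    = (s + ((l.map (fun badge => (PySem.Dict.mk badge).getD "type" "")).count "skill" : Int),
       b + ((l.map (fun badge => (PySem.Dict.mk badge).getD "type" "")).count "bases" : Int)) := by
  induction l generalizing s b with
  | nil => simp
  | cons hd tl ih =>
    simp only [List.foldl_cons, List.map_cons]
    by_cases hs : (PySem.Dict.mk hd).getD "type" "" = "skill" <;>
    by_cases hb : (PySem.Dict.mk hd).getD "type" "" = "bases" <;>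
      simp [hs, hb, ih, List.count_cons, Prod.ext_iff] <;> omega

-- ===== VERDICT (by name: the statement is the Claim_ definition above) =====
theorem get_badge_statistics_spec : Claim_equal_get_badge_statistics := by
  intro badge_info _ _
  show _ = _
  simp only [get_badge_statistics, get_badge_statistics_alt, pv_foldA,
    PySem.List.count_eq]
  simp [add_comm]
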